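-- pv_equiv track=rewrite | github.com/junguksim/PS_zip | programmers/level3/네트워크.py | DFS
-- ===== SOURCE A (Python) =====
-- def DFS(graph):
--     networks = []
--     for i in graph:
--         stack = [i]
--         visited = []
--         while stack:
--             current = stack.pop(-1)
--             if current not in visited:
--                 visited.append(current)
--                 if current in graph:
--                     temp = list(set(graph[current]) - set(visited))
--                     temp = sorted(temp,reverse=True)
--                     stack += temp
--         networks.append(visited)
--     return networks
-- ===== SOURCE B (Python) =====
-- def DFS(graph):
--     def visit(node, visited):
--         visited.append(node)
--         if node in graph:
--             for nb in sorted(set(graph[node])):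
--                 if nb not in visited:
--                     visit(nb, visited)
--     networks = []
--     for i in graph:
--         visited = []
--         visit(i, visited)
--         networks.append(visited)
--     return networks
-- ===== Notes on version B (the rewrite author's own statement) =====
-- stated objective: simpler
-- what changed: Replaced A's explicit value stack (which re-sorts the still-unvisited neighbour set at every visit and re-checks visitedness at pop time) by a plain recursive DFS helper that marks a node at discovery time and recurses into each not-yet-visited neighbour in ascending order.
import Mathlib
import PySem

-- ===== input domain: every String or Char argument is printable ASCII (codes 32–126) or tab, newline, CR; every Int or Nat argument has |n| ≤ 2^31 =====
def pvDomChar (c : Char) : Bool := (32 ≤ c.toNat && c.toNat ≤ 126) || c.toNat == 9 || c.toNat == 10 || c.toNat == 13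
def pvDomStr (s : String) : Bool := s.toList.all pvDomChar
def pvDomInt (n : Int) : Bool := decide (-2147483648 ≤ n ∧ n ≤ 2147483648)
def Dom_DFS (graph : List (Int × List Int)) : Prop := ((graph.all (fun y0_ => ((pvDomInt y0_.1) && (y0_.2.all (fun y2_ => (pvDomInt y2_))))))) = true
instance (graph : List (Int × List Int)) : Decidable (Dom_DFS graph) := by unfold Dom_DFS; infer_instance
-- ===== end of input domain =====

-- B replaces A's explicit value stack (which re-sorts the still-unvisited neighbour set at every visit
-- and re-checks visitedness at pop time) by a plain recursive DFS helper that marks a node at discovery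
-- time and recurses into each not-yet-visited neighbour in ascending order; same return value.

-- ===== PORT A =====
-- all node values occurring in the graph (keys and neighbours); used only in the fuel measures
def pvNodes (graph : List (Int × List Int)) : List Int := graph.flatMap (fun p => p.1 :: p.2)

-- number of graph nodes not yet visited (fuel measure component)
def pvN (graph : List (Int × List Int)) (v : List Int) : Nat :=
  ((pvNodes graph).toFinset \ v.toFinset).card

-- the block A pushes after visiting c: 'temp = sorted(set(graph[current]) - set(visited), reverse=True);
-- stack += temp', with the stack kept top-at-head, so the appended block appears reversed at the front.
def pushOf (graph : List (Int × List Int)) (c : Int) (v' : List Int) : List Int :=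
  match graph.lookup c with
  | some ns => (PySem.List.sorted (PySem.Set.diff (PySem.Set.ofList ns) v') (fun x => x) true).reverse
  | none => []

-- strictly decreasing measure of A's while-loop state; DFSloop is run with more fuel than this,
-- so the fuel-out branch is never taken (proved via loopA_irrel below)
def muA (graph : List (Int × List Int)) (v s : List Int) : Nat :=
  pvN graph v * ((pvNodes graph).length + 1) + s.length

-- A: the while loop over the explicit stack (kept top-at-head); pop, skip if visited, else visit & push
def DFSloop (graph : List (Int × List Int)) : Nat → List Int → List Int → List Int
  | 0, _, visited => visited
  | _ + 1, [], visited => visited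
  | fuel + 1, c :: s, visited =>
    if c ∈ visited then DFSloop graph fuel s visited
    else DFSloop graph fuel (pushOf graph c (visited ++ [c]) ++ s) (visited ++ [c])

-- 'for i in graph: … networks.append(visited)' collecting one traversal per key
def DFS (graph : List (Int × List Int)) : List (List Int) :=
  graph.map (fun p => DFSloop graph (muA graph [] [p.1] + 1) [p.1] [])

-- ===== PORT B =====
-- 'sorted(set(graph[node])) if node in graph else ()' — the ascending neighbour list
def nbrsSorted (graph : List (Int × List Int)) (c : Int) : List Int :=
  match graph.lookup c with
  | some ns => PySem.List.sorted (PySem.Set.ofList ns) (fun x => x) false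
  | none => []

-- 'def visit(node, visited): visited.append(node); for nb in sorted(set(graph[node])):
--    if nb not in visited: visit(nb, visited)' — the recursion carries visited as an accumulator;
-- fuel only makes the recursion structurally terminating and is chosen large enough to never run out
def visitB (graph : List (Int × List Int)) : Nat → Int → List Int → List Int
  | 0, _, visited => visited
  | fuel + 1, node, visited =>
    (nbrsSorted graph node).foldl
      (fun acc nb => if nb ∈ acc then acc else visitB graph fuel nb acc)
      (visited ++ [node])

-- 'for i in graph: visited = []; visit(i, visited); networks.append(visited)'
def DFS_alt (graph : List (Int × List Int)) : List (List Int) :=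
  graph.map (fun p => visitB graph (pvN graph [] + 1) p.1 [])

-- ===== PRECONDITION & SPEC =====
def Spec_DFS (graph : List (Int × List Int)) (out : List (List Int)) : Prop := out = DFS_alt graph
instance (graph : List (Int × List Int)) (out : List (List Int)) : Decidable (Spec_DFS graph out) := by unfold Spec_DFS; infer_instance

-- ===== CLAIM (what is proved, stated in full; the proofs are below) =====
def Claim_equal_DFS : Prop := ∀ (graph : List (Int × List Int)), Dom_DFS graph → Spec_DFS graph (DFS graph)

-- ===== LEMMAS AND PROOFS =====

theorem lookup_sublist {graph : List (Int × List Int)} {c : Int} {ns : List Int}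
    (h : graph.lookup c = some ns) : c ∈ pvNodes graph ∧ ns.Sublist (pvNodes graph) := by
  induction graph with
  | nil => simp [List.lookup] at h
  | cons p t ih =>
    obtain ⟨a, b⟩ := p
    simp only [List.lookup] at h
    by_cases hc : c = a
    · subst hc
      simp at h
      subst h
      constructor
      · simp [pvNodes]
      · simp only [pvNodes, List.flatMap_cons]
        exact ((List.sublist_append_left _ _).trans (List.sublist_cons_self _ _))
    · have hb : (c == a) = false := by simp [hc]
      rw [hb] at h
      rcases ih h with ⟨h1, h2⟩
      constructor
      · simp only [pvNodes, List.flatMap_cons, List.mem_append]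
        right
        simpa [pvNodes] using h1
      · refine h2.trans ?_
        simp only [pvNodes, List.flatMap_cons]
        exact (List.sublist_append_right _ _).trans (List.sublist_cons_self _ _)

theorem lookup_none_of_not_mem {graph : List (Int × List Int)} {c : Int}
    (h : c ∉ pvNodes graph) : graph.lookup c = none := by
  cases hl : graph.lookup c with
  | none => rfl
  | some ns => exact absurd (lookup_sublist hl).1 h

theorem ofList_length_le (xs : List Int) : (PySem.Set.ofList xs).length ≤ xs.length :=
  PySem.Set.length_ofList_le xs

theorem pushOf_length_le (graph : List (Int × List Int)) (c : Int) (v' : List Int) :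
    (pushOf graph c v').length ≤ (pvNodes graph).length := by
  cases hl : graph.lookup c with
  | none => simp [pushOf, hl]
  | some ns =>
    simp only [pushOf, hl, List.length_reverse, PySem.List.length_sorted]
    calc (PySem.Set.diff (PySem.Set.ofList ns) v').length
        ≤ (PySem.Set.ofList ns).length := List.length_filter_le _ _
      _ ≤ ns.length := ofList_length_le ns
      _ ≤ (pvNodes graph).length := (lookup_sublist hl).2.length_le

theorem pushOf_nil_of_not_mem {graph : List (Int × List Int)} {c : Int} (v' : List Int)
    (h : c ∉ pvNodes graph) : pushOf graph c v' = [] := by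
  simp [pushOf, lookup_none_of_not_mem h]

theorem toFinset_append_singleton (v : List Int) (c : Int) :
    (v ++ [c]).toFinset = insert c v.toFinset := by
  ext x; simp

theorem pvN_append_lt {graph : List (Int × List Int)} {v : List Int} {c : Int}
    (hm : c ∈ pvNodes graph) (hv : c ∉ v) : pvN graph (v ++ [c]) < pvN graph v := by
  unfold pvN
  rw [toFinset_append_singleton, Finset.sdiff_insert]
  have hmem : c ∈ (pvNodes graph).toFinset \ v.toFinset := by
    simp [List.mem_toFinset, hm, hv]
  rw [Finset.card_erase_of_mem hmem]
  have : 0 < ((pvNodes graph).toFinset \ v.toFinset).card := Finset.card_pos.mpr ⟨c, hmem⟩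
  omega

theorem pvN_append_eq {graph : List (Int × List Int)} (v : List Int) {c : Int}
    (hm : c ∉ pvNodes graph) : pvN graph (v ++ [c]) = pvN graph v := by
  unfold pvN
  rw [toFinset_append_singleton, Finset.sdiff_insert, Finset.erase_eq_self.mpr]
  simp [List.mem_toFinset, hm]

theorem mu_skip (graph : List (Int × List Int)) (v s : List Int) (c : Int) :
    muA graph v s < muA graph v (c :: s) := by
  simp [muA]

theorem mu_visit {graph : List (Int × List Int)} {v : List Int} {c : Int} (s : List Int)
    (hc : c ∉ v) : muA graph (v ++ [c]) (pushOf graph c (v ++ [c]) ++ s) < muA graph v (c :: s) := by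
  have ht := pushOf_length_le graph c (v ++ [c])
  by_cases hm : c ∈ pvNodes graph
  · have h1 : pvN graph (v ++ [c]) < pvN graph v := pvN_append_lt hm hc
    have h2 : pvN graph (v ++ [c]) * ((pvNodes graph).length + 1) + (pvNodes graph).length
        < pvN graph v * ((pvNodes graph).length + 1) := by
      calc pvN graph (v ++ [c]) * ((pvNodes graph).length + 1) + (pvNodes graph).length
          < (pvN graph (v ++ [c]) + 1) * ((pvNodes graph).length + 1) := by ring_nf; omega
        _ ≤ pvN graph v * ((pvNodes graph).length + 1) := Nat.mul_le_mul_right _ h1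
    simp only [muA, List.length_append, List.length_cons]
    omega
  · rw [pushOf_nil_of_not_mem _ hm]
    simp only [muA, pvN_append_eq v hm, List.length_append, List.length_cons, List.length_nil]
    omega

-- fuel irrelevance: any fuel strictly above the measure gives the same run of A's loop
theorem loopA_irrel (graph : List (Int × List Int)) :
    ∀ (n f1 f2 : Nat) (s v : List Int), muA graph v s ≤ n →
      muA graph v s < f1 → muA graph v s < f2 →
      DFSloop graph f1 s v = DFSloop graph f2 s v := by
  intro n
  induction n using Nat.strong_induction_on with
  | _ n ih =>
    intro f1 f2 s v hn h1 h2
    obtain ⟨a, rfl⟩ : ∃ a, f1 = a + 1 := ⟨f1 - 1, by omega⟩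
    obtain ⟨b, rfl⟩ : ∃ b, f2 = b + 1 := ⟨f2 - 1, by omega⟩
    match s with
    | [] => rfl
    | c :: s' =>
      simp only [DFSloop]
      have hcur : muA graph v (c :: s') ≤ a + 1 - 1 := by omega
      by_cases hc : c ∈ v
      · rw [if_pos hc, if_pos hc]
        have hlt := mu_skip graph v s' c
        exact ih (muA graph v s') (by omega) a b s' v le_rfl (by omega) (by omega)
      · rw [if_neg hc, if_neg hc]
        have hlt := mu_visit (graph := graph) s' hc
        exact ih (muA graph (v ++ [c]) (pushOf graph c (v ++ [c]) ++ s'))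
          (by omega) a b _ _ le_rfl (by omega) (by omega)

-- A's loop with the canonical (always sufficient) fuel
def runA (graph : List (Int × List Int)) (s v : List Int) : List Int :=
  DFSloop graph (muA graph v s + 1) s v

theorem loopA_eq_runA {graph : List (Int × List Int)} {f : Nat} {s v : List Int}
    (h : muA graph v s < f) : DFSloop graph f s v = runA graph s v :=
  loopA_irrel graph (muA graph v s) f (muA graph v s + 1) s v le_rfl h (by omega)

theorem runA_nil (graph : List (Int × List Int)) (v : List Int) : runA graph [] v = v := rfl

theorem runA_cons (graph : List (Int × List Int)) (c : Int) (s v : List Int) :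
    runA graph (c :: s) v =
      if c ∈ v then runA graph s v
      else runA graph (pushOf graph c (v ++ [c]) ++ s) (v ++ [c]) := by
  show DFSloop graph (muA graph v (c :: s) + 1) (c :: s) v = _
  obtain ⟨a, ha⟩ : ∃ a, muA graph v (c :: s) + 1 = a + 1 := ⟨_, rfl⟩
  rw [ha]
  simp only [DFSloop]
  by_cases hc : c ∈ v
  · rw [if_pos hc, if_pos hc]
    exact loopA_eq_runA (by have := mu_skip graph v s c; omega)
  · rw [if_neg hc, if_neg hc]
    exact loopA_eq_runA (by have := mu_visit (graph := graph) s hc; omega)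

theorem subset_runA (graph : List (Int × List Int)) :
    ∀ (n : Nat) (s v : List Int), muA graph v s ≤ n → ∀ x ∈ v, x ∈ runA graph s v := by
  intro n
  induction n using Nat.strong_induction_on with
  | _ n ih =>
    intro s v hmu x hx
    match s with
    | [] => rw [runA_nil]; exact hx
    | c :: s' =>
      rw [runA_cons]
      by_cases hc : c ∈ v
      · rw [if_pos hc]
        exact ih (muA graph v s') (lt_of_lt_of_le (mu_skip graph v s' c) hmu) s' v le_rfl x hx
      · rw [if_neg hc]
        exact ih (muA graph (v ++ [c]) (pushOf graph c (v ++ [c]) ++ s'))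
          (lt_of_lt_of_le (mu_visit s' hc) hmu) _ _ le_rfl x (List.mem_append_left _ hx)

theorem pvN_runA_le (graph : List (Int × List Int)) (s v : List Int) :
    pvN graph (runA graph s v) ≤ pvN graph v := by
  apply Finset.card_le_card
  apply Finset.sdiff_subset_sdiff (Finset.Subset.refl _)
  intro x hx
  rw [List.mem_toFinset] at *
  exact subset_runA graph (muA graph v s) s v le_rfl x hx

theorem runA_append (graph : List (Int × List Int)) :
    ∀ (n : Nat) (s1 s2 v : List Int), muA graph v s1 ≤ n →
      runA graph (s1 ++ s2) v = runA graph s2 (runA graph s1 v) := by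
  intro n
  induction n using Nat.strong_induction_on with
  | _ n ih =>
    intro s1 s2 v hmu
    match s1 with
    | [] => rw [List.nil_append, runA_nil]
    | c :: s' =>
      rw [List.cons_append, runA_cons, runA_cons]
      by_cases hc : c ∈ v
      · rw [if_pos hc, if_pos hc]
        exact ih (muA graph v s') (lt_of_lt_of_le (mu_skip graph v s' c) hmu) s' s2 v le_rfl
      · rw [if_neg hc, if_neg hc, ← List.append_assoc]
        exact ih (muA graph (v ++ [c]) (pushOf graph c (v ++ [c]) ++ s'))
          (lt_of_lt_of_le (mu_visit s' hc) hmu) _ s2 _ le_rfl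

theorem push_eq_filter (graph : List (Int × List Int)) (c : Int) (v' : List Int) :
    pushOf graph c v' = (nbrsSorted graph c).filter (fun x => decide (x ∉ v')) := by
  cases hl : graph.lookup c with
  | none => simp [pushOf, nbrsSorted, hl]
  | some ns =>
    simp only [pushOf, nbrsSorted, hl]
    have hpred : ∀ x : Int, (!(PySem.Set.contains v' x)) = decide (x ∉ v') := by
      intro x
      by_cases hx : x ∈ v' <;> simp [PySem.Set.contains, hx]
    refine List.Perm.eq_of_pairwise (le := fun a b : Int => a ≤ b)
      (fun a b _ _ h1 h2 => le_antisymm h1 h2) ?_ ?_ ?_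
    · rw [List.pairwise_reverse]
      exact PySem.List.sorted_pairwise_rev _ _
    · exact (PySem.List.sorted_ofList_pairwise_lt ns).filter _ |>.imp le_of_lt
    · have hdiffeq : PySem.Set.diff (PySem.Set.ofList ns) v'
          = (PySem.Set.ofList ns).filter (fun x => decide (x ∉ v')) := by
        unfold PySem.Set.diff
        exact List.filter_congr (fun x _ => hpred x)
      have p1 : ((PySem.List.sorted (PySem.Set.diff (PySem.Set.ofList ns) v') (fun x => x) true).reverse).Perm
          (PySem.Set.diff (PySem.Set.ofList ns) v') :=
        (List.reverse_perm _).trans (PySem.List.sorted_perm _ _ _)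
      have p2 : ((PySem.Set.ofList ns).filter (fun x => decide (x ∉ v'))).Perm
          ((PySem.List.sorted (PySem.Set.ofList ns) (fun x => x) false).filter
            (fun x => decide (x ∉ v'))) :=
        ((PySem.List.sorted_perm (PySem.Set.ofList ns) (fun x => x) false).filter _).symm
      exact p1.trans (hdiffeq ▸ p2)

theorem nbrsSorted_nil_of_not_mem {graph : List (Int × List Int)} {c : Int}
    (h : c ∉ pvNodes graph) : nbrsSorted graph c = [] := by
  simp [nbrsSorted, lookup_none_of_not_mem h]

theorem runA_single {graph : List (Int × List Int)} {c : Int} {v : List Int} (hc : c ∉ v) :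
    runA graph [c] v = runA graph (pushOf graph c (v ++ [c])) (v ++ [c]) := by
  rw [runA_cons, if_neg hc, List.append_nil]

theorem filter_collapse {v v3 : List Int} (hsub : ∀ y ∈ v, y ∈ v3) (l : List Int) :
    (l.filter (fun x => decide (x ∉ v))).filter (fun x => decide (x ∉ v3)) =
      l.filter (fun x => decide (x ∉ v3)) := by
  rw [List.filter_filter]
  apply List.filter_congr
  intro x _
  by_cases h3 : x ∈ v3
  · simp [h3]
  · have hv : x ∉ v := fun hx => h3 (hsub x hx)
    simp [h3, hv]

theorem runA_filter (graph : List (Int × List Int)) :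
    ∀ (n : Nat) (l v : List Int), muA graph v l ≤ n →
      runA graph (l.filter (fun x => decide (x ∉ v))) v = runA graph l v := by
  intro n
  induction n using Nat.strong_induction_on with
  | _ n ih =>
    intro l v hmu
    match l with
    | [] => rw [List.filter_nil]
    | x :: l' =>
      by_cases hv : x ∈ v
      · have he : (x :: l').filter (fun y => decide (y ∉ v)) = l'.filter (fun y => decide (y ∉ v)) := by
          simp [hv]
        rw [he, runA_cons, if_pos hv]
        exact ih (muA graph v l') (lt_of_lt_of_le (mu_skip graph v l' x) hmu) l' v le_rfl
      · have he : (x :: l').filter (fun y => decide (y ∉ v)) = x :: l'.filter (fun y => decide (y ∉ v)) := by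
          simp [hv]
        rw [he]
        have hone : muA graph v [x] ≤ n := by
          refine le_trans ?_ hmu
          simp [muA]
        have e1 : runA graph (x :: l'.filter (fun y => decide (y ∉ v))) v
            = runA graph (l'.filter (fun y => decide (y ∉ v))) (runA graph [x] v) := by
          simpa using runA_append graph n [x] (l'.filter (fun y => decide (y ∉ v))) v hone
        have e2 : runA graph (x :: l') v = runA graph l' (runA graph [x] v) := by
          simpa using runA_append graph n [x] l' v hone
        rw [e1, e2]
        have hsub : ∀ y ∈ v, y ∈ runA graph [x] v :=
          subset_runA graph (muA graph v [x]) [x] v le_rfl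
        have hN3 : pvN graph (runA graph [x] v) ≤ pvN graph v := pvN_runA_le graph [x] v
        have hlt : muA graph (runA graph [x] v) l' < n := by
          have : muA graph (runA graph [x] v) l'
              ≤ pvN graph v * ((pvNodes graph).length + 1) + l'.length := by
            simp only [muA]
            exact Nat.add_le_add_right (Nat.mul_le_mul_right _ hN3) _
          have hm2 : pvN graph v * ((pvNodes graph).length + 1) + l'.length < muA graph v (x :: l') := by
            simp [muA]
          omega
        have hlt2 : muA graph (runA graph [x] v) (l'.filter (fun y => decide (y ∉ v))) < n := by
          have hle : (l'.filter (fun y => decide (y ∉ v))).length ≤ l'.length :=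
            List.length_filter_le _ _
          have : muA graph (runA graph [x] v) (l'.filter (fun y => decide (y ∉ v)))
              ≤ muA graph (runA graph [x] v) l' := by
            simp only [muA]; omega
          omega
        calc runA graph (l'.filter (fun y => decide (y ∉ v))) (runA graph [x] v)
            = runA graph ((l'.filter (fun y => decide (y ∉ v))).filter
                (fun y => decide (y ∉ runA graph [x] v))) (runA graph [x] v) :=
              (ih _ hlt2 _ _ le_rfl).symm
          _ = runA graph (l'.filter (fun y => decide (y ∉ runA graph [x] v)))
                (runA graph [x] v) := by rw [filter_collapse hsub]
          _ = runA graph l' (runA graph [x] v) := ih _ hlt _ _ le_rfl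

-- the recursive visit equals A's stack run started on the single node, for any sufficient fuel
theorem visitB_eq_runA (graph : List (Int × List Int)) :
    ∀ (n fuel : Nat) (c : Int) (v : List Int), pvN graph v = n → n < fuel → c ∉ v →
      visitB graph fuel c v = runA graph [c] v := by
  intro n
  induction n using Nat.strong_induction_on with
  | _ n ih =>
    intro fuel c v hn hf hc
    obtain ⟨f, rfl⟩ : ∃ f, fuel = f + 1 := ⟨fuel - 1, by omega⟩
    have hA : runA graph [c] v = runA graph (nbrsSorted graph c) (v ++ [c]) := by
      rw [runA_single hc, push_eq_filter]
      exact runA_filter graph (muA graph (v ++ [c]) (nbrsSorted graph c)) _ _ le_rfl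
    simp only [visitB]
    by_cases hm : c ∈ pvNodes graph
    · have hlt : pvN graph (v ++ [c]) < n := hn ▸ pvN_append_lt hm hc
      rw [hA]
      -- inner induction over the neighbour list, accumulator generalized
      have inner : ∀ (l : List Int) (acc : List Int), pvN graph acc < n →
          l.foldl (fun acc nb => if nb ∈ acc then acc else visitB graph f nb acc) acc
            = runA graph l acc := by
        intro l
        induction l with
        | nil => intro acc _; rw [List.foldl_nil, runA_nil]
        | cons nb rest ihl =>
          intro acc hacc
          rw [List.foldl_cons, runA_cons]
          by_cases hnb : nb ∈ acc
          · rw [if_pos hnb, if_pos hnb]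
            exact ihl acc hacc
          · rw [if_neg hnb, if_neg hnb]
            have hstep : visitB graph f nb acc = runA graph [nb] acc :=
              ih (pvN graph acc) hacc f nb acc rfl (by omega) hnb
            rw [hstep]
            have hsingle : runA graph [nb] acc
                = runA graph (pushOf graph nb (acc ++ [nb])) (acc ++ [nb]) := runA_single hnb
            have hacc' : pvN graph (runA graph [nb] acc) < n :=
              lt_of_le_of_lt (pvN_runA_le graph [nb] acc) hacc
            rw [ihl (runA graph [nb] acc) hacc', hsingle]
            exact (runA_append graph (muA graph (acc ++ [nb])
              (pushOf graph nb (acc ++ [nb]))) _ rest _ le_rfl).symm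
      exact inner (nbrsSorted graph c) (v ++ [c]) hlt
    · rw [nbrsSorted_nil_of_not_mem hm, List.foldl_nil, hA,
        nbrsSorted_nil_of_not_mem hm, runA_nil]

-- ===== VERDICT (by name: the statement is the Claim_ definition above) =====
theorem DFS_spec : Claim_equal_DFS := by
  intro graph _
  unfold Spec_DFS DFS DFS_alt
  apply List.map_congr_left
  intro p _
  rw [visitB_eq_runA graph (pvN graph []) (pvN graph [] + 1) p.1 [] rfl (by omega)
    (List.not_mem_nil), loopA_eq_runA (by omega)]
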